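-- pv_equiv track=rewrite | github.com/relighting123/Algorithm | 1953-maximum-number-of-weeks-for-which-you-can-work/1953-maximum-number-of-weeks-for-which-you-can-work.py | numberOfWeeks
-- ===== SOURCE A (Python) =====
-- from typing import List
--
-- def numberOfWeeks(milestones: List[int]) -> int:
--     task_list = sum(milestones)
--     max_task_cnt = max(milestones)
--     num_distinct_cnt = sum(1 for i in milestones if i==max_task_cnt)
--     if num_distinct_cnt>=2:
--         idle=0
--     else:
--         idle = (max_task_cnt-1)
--     remain_task=task_list-num_distinct_cnt*max_task_cnt
--     if idle<remain_task:
--         return max(idle,remain_task)+num_distinct_cnt*max_task_cnt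
--     else:
--         return max(idle,remain_task)+num_distinct_cnt*max_task_cnt - 2*(idle-remain_task)
-- ===== SOURCE B (Python) =====
-- from typing import List
--
-- def numberOfWeeks(milestones: List[int]) -> int:
--     s = sorted(milestones, reverse=True)
--     m = s[0]
--     i = 1
--     while i < len(s) and s[i] == m:
--         i += 1
--     rest = sum(s[i:])
--     idle = 0 if i >= 2 else m - 1
--     return i * m + rest if idle < rest else i * m + 2 * rest - idle
-- ===== Notes on version B (the rewrite author's own statement) =====
-- stated objective: alternative
-- what changed: B sorts the list descending and scans the leading run of equal maxima, then slice-sums the remainder, instead of A's max()/sum() builtin passes plus a whole-list generator counting the maxima; A's two max()-based correction branches become direct arithmetic on the run length and the tail sum.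
import Mathlib
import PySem

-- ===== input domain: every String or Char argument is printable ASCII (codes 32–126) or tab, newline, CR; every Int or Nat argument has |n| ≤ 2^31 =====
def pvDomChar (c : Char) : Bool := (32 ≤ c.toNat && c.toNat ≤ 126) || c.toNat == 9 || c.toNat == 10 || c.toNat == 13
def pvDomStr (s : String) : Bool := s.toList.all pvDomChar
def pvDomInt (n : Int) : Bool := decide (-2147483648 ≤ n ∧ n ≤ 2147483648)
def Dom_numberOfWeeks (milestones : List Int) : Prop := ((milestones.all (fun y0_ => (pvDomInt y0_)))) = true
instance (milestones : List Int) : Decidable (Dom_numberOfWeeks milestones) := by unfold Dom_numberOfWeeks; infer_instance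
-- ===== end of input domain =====

-- B sorts descending and scans the leading run of equal maxima (sort-then-scan) instead of
-- A's builtin sum/max passes plus a generator counting the maxima: an alternative decomposition.


-- ===== PORT A =====
def numberOfWeeks (milestones : List Int) : Int :=
  let task_list := milestones.sum
  match PySem.List.max? milestones (fun x => x) with
  | none => 0  -- max([]) raises ValueError; excluded by Pre_
  | some max_task_cnt =>
    let num_distinct_cnt : Int := (milestones.map (fun i => if i = max_task_cnt then (1:Int) else 0)).sum
    let idle : Int := if 2 ≤ num_distinct_cnt then 0 else max_task_cnt - 1
    let remain_task := task_list - num_distinct_cnt * max_task_cnt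
    if idle < remain_task then
      max idle remain_task + num_distinct_cnt * max_task_cnt
    else
      max idle remain_task + num_distinct_cnt * max_task_cnt - 2 * (idle - remain_task)

-- ===== PORT B =====
-- the while loop 'i = 1; while i < len(s) and s[i] == m: i += 1' followed by the slice s[i:]:
-- consume the leading run of elements equal to m in s[1:], returning (extra run length, s[i:])
def nwRun (m : Int) : List Int → Int × List Int
  | [] => (0, [])
  | x :: xs => if x = m then ((nwRun m xs).1 + 1, (nwRun m xs).2) else (0, x :: xs)

def numberOfWeeks_alt (milestones : List Int) : Int :=
  match PySem.List.sorted milestones (fun x => x) true with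
  | [] => 0  -- s[0] raises IndexError on empty; excluded by Pre_
  | m :: u =>
    let p := nwRun m u
    let i : Int := 1 + p.1
    let rest := p.2.sum
    let idle : Int := if 2 ≤ i then 0 else m - 1
    if idle < rest then i * m + rest else i * m + 2 * rest - idle

-- ===== PRECONDITION & SPEC =====
-- Pre_ excludes only the empty list, where A raises ValueError (max of empty sequence).
def Pre_numberOfWeeks (milestones : List Int) : Prop := milestones ≠ []
instance (milestones : List Int) : Decidable (Pre_numberOfWeeks milestones) := by unfold Pre_numberOfWeeks; infer_instance
def pvWitness_numberOfWeeks : List Int := [1, 2, 3]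

def Spec_numberOfWeeks (milestones : List Int) (out : Int) : Prop := out = numberOfWeeks_alt milestones
instance (milestones : List Int) (out : Int) : Decidable (Spec_numberOfWeeks milestones out) := by unfold Spec_numberOfWeeks; infer_instance

-- ===== CLAIM (what is proved, stated in full; the proofs are below) =====
def Claim_equal_numberOfWeeks : Prop := ∀ (milestones : List Int), Dom_numberOfWeeks milestones → Pre_numberOfWeeks milestones → Spec_numberOfWeeks milestones (numberOfWeeks milestones)

-- ===== LEMMAS AND PROOFS =====

-- A's indicator sum is the count of M
theorem pv_indicator_sum (M : Int) : ∀ (l : List Int),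
    (l.map (fun i => if i = M then (1:Int) else 0)).sum = (l.count M : Int) := by
  intro l
  induction l with
  | nil => simp
  | cons x t ih =>
    by_cases h : x = M
    · simp [h, ih]
      ring
    · simp [ih, Ne, h]

-- on a weakly descending list all of whose elements are ≤ m, nwRun computes the count of m
-- and the remainder's sum
theorem pv_nwRun_spec (m : Int) : ∀ (u : List Int),
    (∀ x ∈ u, x ≤ m) → u.Pairwise (fun a b => b ≤ a) →
    (nwRun m u).1 = (u.count m : Int) ∧ (nwRun m u).2.sum = u.sum - (u.count m : Int) * m := by
  intro u
  induction u with
  | nil => intro _ _; simp [nwRun]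
  | cons x xs ih =>
    intro hall hpw
    rcases List.pairwise_cons.mp hpw with ⟨hx, hpw'⟩
    by_cases h : x = m
    · subst h
      have hall' : ∀ y ∈ xs, y ≤ x := hx
      obtain ⟨h1, h2⟩ := ih hall' hpw'
      constructor
      · simp [nwRun, h1]
      · simp [nwRun, h2]
        ring
    · -- x < m, and every later element is ≤ x, so m does not occur in x :: xs
      have hxlt : x < m := lt_of_le_of_ne (hall x (by simp)) h
      have hcnt : (x :: xs).count m = 0 := by
        rw [List.count_eq_zero]
        intro hm
        rcases List.mem_cons.mp hm with h' | h'
        · exact h h'.symm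
        · have := hx m h'; omega
      refine ⟨by simp [nwRun, h, hcnt], ?_⟩
      simp [nwRun, h, hcnt]

-- pure arithmetic: A's two max()-based branches equal B's direct branches, given the
-- same sum S, maximum m and maxima-count C
theorem pv_arith (S m C : Int) :
    (if (if 2 ≤ C then (0:Int) else m - 1) < S - C * m then
       max (if 2 ≤ C then (0:Int) else m - 1) (S - C * m) + C * m
     else
       max (if 2 ≤ C then (0:Int) else m - 1) (S - C * m) + C * m -
         2 * ((if 2 ≤ C then (0:Int) else m - 1) - (S - C * m))) =
      (if (if 2 ≤ C then (0:Int) else m - 1) < S - C * m then C * m + (S - C * m)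
       else C * m + 2 * (S - C * m) - (if 2 ≤ C then (0:Int) else m - 1)) := by
  generalize (if 2 ≤ C then (0:Int) else m - 1) = idle
  generalize C * m = k
  simp only [max_def]
  split_ifs <;> omega

-- ===== VERDICT (by name: the statement is the Claim_ definition above) =====
theorem numberOfWeeks_spec : Claim_equal_numberOfWeeks := by
  intro l _ hne
  unfold Spec_numberOfWeeks numberOfWeeks numberOfWeeks_alt
  -- A's max
  rcases hM : PySem.List.max? l (fun x => x) with _ | M
  · exact absurd ((PySem.List.max?_eq_none_iff (xs:=l) (key:=fun x => x)).mp hM) hne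
  have hMmem : M ∈ l := PySem.List.max?_mem hM
  have hMmax : ∀ y ∈ l, y ≤ M := PySem.List.max?_isMax hM
  -- B's sorted list
  rcases hs : PySem.List.sorted l (fun x => x) true with _ | ⟨m, u⟩
  · exact absurd (((PySem.List.sorted_eq_nil_iff l (fun x => x) true).mp hs)) hne
  have hperm : (m :: u).Perm l := hs ▸ PySem.List.sorted_perm l (fun x => x) true
  have hmmem : m ∈ l := hperm.mem_iff.mp (by simp)
  have hge : ∀ y ∈ l, y ≤ m := PySem.List.key_head_sorted_rev_ge l (fun x => x) hs
  have hmM : m = M := le_antisymm (hMmax m hmmem) (hge M hMmem)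
  have hpw : (m :: u).Pairwise (fun a b => b ≤ a) := by
    have := PySem.List.sorted_pairwise_rev l (fun x => x)
    rwa [hs] at this
  rcases List.pairwise_cons.mp hpw with ⟨hu_le, hu_pw⟩
  obtain ⟨hcnt, hsum⟩ := pv_nwRun_spec m u hu_le hu_pw
  -- counts and sums transported along the permutation
  have hcount_l : (l.count m : Int) = 1 + (u.count m : Int) := by
    rw [← hperm.count_eq]
    simp
    ring
  have hsum_l : l.sum = m + u.sum := by
    rw [← hperm.sum_eq, List.sum_cons]
  -- rewrite both sides into the shape of pv_arith
  subst hmM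
  simp only [pv_indicator_sum, hcount_l, hsum_l, hcnt, hsum]
  rw [show u.sum - (u.count m : Int) * m = (m + u.sum) - (1 + (u.count m : Int)) * m from by ring]
  exact pv_arith (m + u.sum) m (1 + (u.count m : Int))
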